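-- pv_equiv track=rewrite | github.com/saloscoin/open-source | config.py | get_difficulty_multiplier
-- ===== SOURCE A (Python) =====
-- def get_difficulty_multiplier(height: int) -> int:
--     """
--     Get difficulty multiplier for block height.
--     Increases base difficulty at milestone blocks for network security.
--
--     Args:
--         height: Block height
--
--     Returns:
--         Difficulty multiplier
--     """
--     multiplier = 1
--     for milestone_height, mult in sorted(DIFFICULTY_MILESTONES.items()):
--         if height >= milestone_height:
--             multiplier = mult
--         else:
--             break
--     return multiplier
--
-- DIFFICULTY_MILESTONES = {
--     0: 1,           # Genesis: normal difficulty
--     1_000: 2,       # After 1K blocks: 2x harder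
--     10_000: 4,      # After 10K blocks: 4x harder
--     100_000: 8,     # After 100K blocks: 8x harder
--     500_000: 16,    # After 500K blocks: 16x harder
--     1_000_000: 32,  # After 1M blocks: 32x harder
--     2_000_000: 64,  # After 2M blocks: 64x harder
-- }
-- ===== SOURCE B (Python) =====
-- # B: binary search over precomputed sorted milestone key/value tables instead of a linear scan of sorted dict items.
-- _MILESTONE_KEYS = [0, 1_000, 10_000, 100_000, 500_000, 1_000_000, 2_000_000]
-- _MILESTONE_VALS = [1, 2, 4, 8, 16, 32, 64]
--
--
-- def get_difficulty_multiplier(height: int) -> int: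
--     lo, hi = 0, len(_MILESTONE_KEYS)
--     while lo < hi:
--         mid = (lo + hi) // 2
--         if _MILESTONE_KEYS[mid] <= height:
--             lo = mid + 1
--         else:
--             hi = mid
--     if lo == 0:
--         return 1
--     return _MILESTONE_VALS[lo - 1]
-- ===== Notes on version B (the rewrite author's own statement) =====
-- stated objective: alternative
-- what changed: Replaces A's linear scan-with-break over sorted(DIFFICULTY_MILESTONES.items()) by a binary search (hand-rolled bisect_right) over precomputed sorted key and value tables, indexing the value table once.
import Mathlib
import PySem

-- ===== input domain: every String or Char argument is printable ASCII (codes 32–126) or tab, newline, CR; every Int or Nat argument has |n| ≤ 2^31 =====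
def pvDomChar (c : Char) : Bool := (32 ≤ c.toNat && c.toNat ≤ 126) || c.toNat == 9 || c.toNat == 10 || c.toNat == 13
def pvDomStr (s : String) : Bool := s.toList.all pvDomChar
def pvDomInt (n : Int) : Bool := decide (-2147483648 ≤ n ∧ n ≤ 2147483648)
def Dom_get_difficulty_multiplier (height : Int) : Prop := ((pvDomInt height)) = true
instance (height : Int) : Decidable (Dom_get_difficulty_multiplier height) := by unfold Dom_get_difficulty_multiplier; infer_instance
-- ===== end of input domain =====

-- B replaces A's linear scan over sorted dict items with a binary search over precomputed key/value tables (alternative algorithm; return value only, no side effects involved).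


-- ===== PORT A =====
def pvMilestones : PySem.Dict Int Int :=
  PySem.Dict.ofList [(0, 1), (1000, 2), (10000, 4), (100000, 8), (500000, 16), (1000000, 32), (2000000, 64)]

-- A's 'for (k, v) in sorted(...): if height >= k: multiplier = v; else: break'
def pvALoop (height : Int) : List (Int × Int) → Int → Int
  | [], m => m
  | (k, v) :: rest, m => if k ≤ height then pvALoop height rest v else m

def get_difficulty_multiplier (height : Int) : Int :=
  pvALoop height (PySem.List.sorted2 pvMilestones.items Prod.fst Prod.snd) 1

-- ===== PORT B =====
def pvKeys : List Int := [0, 1000, 10000, 100000, 500000, 1000000, 2000000]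
def pvVals : List Int := [1, 2, 4, 8, 16, 32, 64]

-- B's 'while lo < hi' binary-search loop (every index it reads is provably in range, so getD is exact here)
def pvBisect (height : Int) (lo hi : Nat) : Nat :=
  if _h : lo < hi then
    let mid := (lo + hi) / 2
    if pvKeys.getD mid 0 ≤ height then pvBisect height (mid + 1) hi
    else pvBisect height lo mid
  else lo
termination_by hi - lo
decreasing_by all_goals omega

def get_difficulty_multiplier_alt (height : Int) : Int :=
  let lo := pvBisect height 0 pvKeys.length
  if lo = 0 then 1 else pvVals.getD (lo - 1) 0

-- ===== PRECONDITION & SPEC =====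
def Spec_get_difficulty_multiplier (height : Int) (out : Int) : Prop := out = get_difficulty_multiplier_alt height
instance (height : Int) (out : Int) : Decidable (Spec_get_difficulty_multiplier height out) := by unfold Spec_get_difficulty_multiplier; infer_instance

-- ===== CLAIM (what is proved, stated in full; the proofs are below) =====
def Claim_equal_get_difficulty_multiplier : Prop := ∀ (height : Int), Dom_get_difficulty_multiplier height → Spec_get_difficulty_multiplier height (get_difficulty_multiplier height)

-- ===== LEMMAS AND PROOFS =====

lemma pvSortedItems :
    PySem.List.sorted2 pvMilestones.items Prod.fst Prod.snd
      = [(0, 1), (1000, 2), (10000, 4), (100000, 8), (500000, 16), (1000000, 32), (2000000, 64)] := by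
  decide

-- A's result as a chain of threshold tests
lemma pvA_eval (height : Int) :
    get_difficulty_multiplier height =
      if (2000000 : Int) ≤ height then 64
      else if (1000000 : Int) ≤ height then 32
      else if (500000 : Int) ≤ height then 16
      else if (100000 : Int) ≤ height then 8
      else if (10000 : Int) ≤ height then 4
      else if (1000 : Int) ≤ height then 2
      else 1 := by
  unfold get_difficulty_multiplier
  rw [pvSortedItems]
  simp only [pvALoop]
  split_ifs <;> omega

-- the value of the binary search on each of the eight height intervals
lemma pvBis0 (height : Int) (h1 : height < 0) : pvBisect height 0 7 = 0 := by
  rw [pvBisect.eq_def]; norm_num [pvKeys]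
  rw [if_neg (by omega)]
  rw [pvBisect.eq_def]; norm_num [pvKeys]
  rw [if_neg (by omega)]
  rw [pvBisect.eq_def]; norm_num [pvKeys]
  rw [if_neg (by omega)]
  rw [pvBisect.eq_def]; norm_num

lemma pvBis1 (height : Int) (h1 : (0:Int) ≤ height) (h2 : height < 1000) : pvBisect height 0 7 = 1 := by
  rw [pvBisect.eq_def]; norm_num [pvKeys]
  rw [if_neg (by omega)]
  rw [pvBisect.eq_def]; norm_num [pvKeys]
  rw [if_neg (by omega)]
  rw [pvBisect.eq_def]; norm_num [pvKeys]
  rw [if_pos (by omega)]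
  rw [pvBisect.eq_def]; norm_num

lemma pvBis2 (height : Int) (h1 : (1000:Int) ≤ height) (h2 : height < 10000) : pvBisect height 0 7 = 2 := by
  rw [pvBisect.eq_def]; norm_num [pvKeys]
  rw [if_neg (by omega)]
  rw [pvBisect.eq_def]; norm_num [pvKeys]
  rw [if_pos (by omega)]
  rw [pvBisect.eq_def]; norm_num [pvKeys]
  rw [if_neg (by omega)]
  rw [pvBisect.eq_def]; norm_num

lemma pvBis3 (height : Int) (h1 : (10000:Int) ≤ height) (h2 : height < 100000) : pvBisect height 0 7 = 3 := by
  rw [pvBisect.eq_def]; norm_num [pvKeys]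
  rw [if_neg (by omega)]
  rw [pvBisect.eq_def]; norm_num [pvKeys]
  rw [if_pos (by omega)]
  rw [pvBisect.eq_def]; norm_num [pvKeys]
  rw [if_pos (by omega)]
  rw [pvBisect.eq_def]; norm_num

lemma pvBis4 (height : Int) (h1 : (100000:Int) ≤ height) (h2 : height < 500000) : pvBisect height 0 7 = 4 := by
  rw [pvBisect.eq_def]; norm_num [pvKeys]
  rw [if_pos (by omega)]
  rw [pvBisect.eq_def]; norm_num [pvKeys]
  rw [if_neg (by omega)]
  rw [pvBisect.eq_def]; norm_num [pvKeys]
  rw [if_neg (by omega)]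
  rw [pvBisect.eq_def]; norm_num

lemma pvBis5 (height : Int) (h1 : (500000:Int) ≤ height) (h2 : height < 1000000) : pvBisect height 0 7 = 5 := by
  rw [pvBisect.eq_def]; norm_num [pvKeys]
  rw [if_pos (by omega)]
  rw [pvBisect.eq_def]; norm_num [pvKeys]
  rw [if_neg (by omega)]
  rw [pvBisect.eq_def]; norm_num [pvKeys]
  rw [if_pos (by omega)]
  rw [pvBisect.eq_def]; norm_num

lemma pvBis6 (height : Int) (h1 : (1000000:Int) ≤ height) (h2 : height < 2000000) : pvBisect height 0 7 = 6 := by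
  rw [pvBisect.eq_def]; norm_num [pvKeys]
  rw [if_pos (by omega)]
  rw [pvBisect.eq_def]; norm_num [pvKeys]
  rw [if_pos (by omega)]
  rw [pvBisect.eq_def]; norm_num [pvKeys]
  rw [if_neg (by omega)]
  rw [pvBisect.eq_def]; norm_num

lemma pvBis7 (height : Int) (h1 : (2000000:Int) ≤ height) : pvBisect height 0 7 = 7 := by
  rw [pvBisect.eq_def]; norm_num [pvKeys]
  rw [if_pos (by omega)]
  rw [pvBisect.eq_def]; norm_num [pvKeys]
  rw [if_pos (by omega)]
  rw [pvBisect.eq_def]; norm_num [pvKeys]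
  rw [if_pos (by omega)]
  rw [pvBisect.eq_def]; norm_num

-- B's result as the same chain of threshold tests
lemma pvB_eval (height : Int) :
    get_difficulty_multiplier_alt height =
      if (2000000 : Int) ≤ height then 64
      else if (1000000 : Int) ≤ height then 32
      else if (500000 : Int) ≤ height then 16
      else if (100000 : Int) ≤ height then 8
      else if (10000 : Int) ≤ height then 4
      else if (1000 : Int) ≤ height then 2
      else 1 := by
  unfold get_difficulty_multiplier_alt
  show (if pvBisect height 0 7 = 0 then (1:Int) else pvVals.getD (pvBisect height 0 7 - 1) 0) = _
  rcases lt_or_ge height 0 with h | h0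
  · rw [pvBis0 height h]; norm_num; omega
  rcases lt_or_ge height 1000 with h | h1
  · rw [pvBis1 height h0 h]; norm_num [pvVals]; split_ifs <;> omega
  rcases lt_or_ge height 10000 with h | h2
  · rw [pvBis2 height h1 h]; norm_num [pvVals]; split_ifs <;> omega
  rcases lt_or_ge height 100000 with h | h3
  · rw [pvBis3 height h2 h]; norm_num [pvVals]; split_ifs <;> omega
  rcases lt_or_ge height 500000 with h | h4
  · rw [pvBis4 height h3 h]; norm_num [pvVals]; split_ifs <;> omega
  rcases lt_or_ge height 1000000 with h | h5
  · rw [pvBis5 height h4 h]; norm_num [pvVals]; split_ifs <;> omega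
  rcases lt_or_ge height 2000000 with h | h6
  · rw [pvBis6 height h5 h]; norm_num [pvVals]; split_ifs <;> omega
  · rw [pvBis7 height h6]; norm_num [pvVals]; split_ifs <;> omega

-- ===== VERDICT (by name: the statement is the Claim_ definition above) =====
theorem get_difficulty_multiplier_spec : Claim_equal_get_difficulty_multiplier := by
  intro height _
  unfold Spec_get_difficulty_multiplier
  rw [pvA_eval, pvB_eval]
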